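-- pv_equiv track=rewrite | github.com/agral/CompetitiveProgramming | LeetCode/3539/python/lc3539.py | magicalSum
-- ===== SOURCE A (Python) =====
-- import functools
-- import math
-- from typing import List
--
-- def magicalSum(m: int, k: int, nums: List[int]) -> int:
--     MOD = 1_000_000_007
--
--     @functools.lru_cache(None)
--     def dp(m: int, k: int, i: int, carry: int) -> int:
--         """Returns the count of magical sequences of length `k`
--            that can be formed from the first `i` numbers in `nums`
--            using at most `m` elements."""
--         if m < 0 or k < 0 or (m + carry.bit_count() < k):
--             return 0
--         if m == 0:
--             return 1 if k == carry.bit_count() else 0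
--         if i == len(nums):
--             return 0
--
--         ans = 0
--         for c in range(m + 1):
--             delta = math.comb(m, c) * pow(nums[i], c, MOD) % MOD
--             nextCarry = carry + c
--             ans += dp(m - c, k - (nextCarry % 2), i + 1, nextCarry // 2) * delta
--             ans %= MOD
--         return ans
--
--     return dp(m, k, 0, 0)
-- ===== SOURCE B (Python) =====
-- import math
-- from typing import List
--
-- def magicalSum(m: int, k: int, nums: List[int]) -> int:
--     MOD = 1_000_000_007
--
--     # bottom-up: dict of states (m_remaining, k_remaining, carry) -> weighted count mod MOD
--     states = {(m, k, 0): 1}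
--     ans = 0
--     for x in nums:
--         nxt = {}
--         for (mm, kk, carry), cnt in states.items():
--             if mm < 0 or kk < 0 or mm + carry.bit_count() < kk:
--                 continue
--             if mm == 0:
--                 if kk == carry.bit_count():
--                     ans = (ans + cnt) % MOD
--                 continue
--             for c in range(mm + 1):
--                 delta = math.comb(mm, c) * pow(x, c, MOD) % MOD
--                 nc = carry + c
--                 key = (mm - c, kk - nc % 2, nc // 2)
--                 nxt[key] = (nxt.get(key, 0) + cnt * delta) % MOD
--         states = nxt
--     for (mm, kk, carry), cnt in states.items():
--         if mm == 0 and kk == carry.bit_count():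
--             ans = (ans + cnt) % MOD
--     return ans
-- ===== Notes on version B (the rewrite author's own statement) =====
-- stated objective: alternative
-- what changed: Replaced A's memoized top-down recursion (lru_cache over (m,k,i,carry)) by an explicit bottom-up tabulation: one pass over nums maintaining a dict from carry-states to modular weighted counts, collecting base-case states into the answer as they arise.
import Mathlib
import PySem

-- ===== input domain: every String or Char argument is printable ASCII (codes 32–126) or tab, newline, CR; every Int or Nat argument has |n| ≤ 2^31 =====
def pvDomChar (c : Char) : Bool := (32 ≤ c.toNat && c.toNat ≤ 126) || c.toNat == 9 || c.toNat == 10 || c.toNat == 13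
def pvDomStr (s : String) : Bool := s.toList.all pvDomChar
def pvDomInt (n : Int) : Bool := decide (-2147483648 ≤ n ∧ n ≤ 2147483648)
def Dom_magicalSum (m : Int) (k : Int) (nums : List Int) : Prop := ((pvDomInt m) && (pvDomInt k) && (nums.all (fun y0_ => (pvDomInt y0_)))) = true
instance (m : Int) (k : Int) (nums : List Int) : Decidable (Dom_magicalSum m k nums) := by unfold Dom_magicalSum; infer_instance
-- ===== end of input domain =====

-- B replaces A's memoized top-down recursion by a bottom-up tabulation: one pass over `nums`
-- maintaining a dict from carry-states to modular weighted counts (objective: alternative decomposition).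

-- math.comb(n, c); exact for the only calls both programs make (n ≥ 1, 0 ≤ c ≤ n)
def pyComb (n c : Int) : Int := (Nat.choose n.toNat c.toNat : Int)

-- ===== PORT A =====
-- A's inner `for c in range(m+1)` loop (accumulator `ans`) and the recursive dp, as mutual structural recursion
mutual
def magicalSumDp (m k : Int) (rest : List Int) (carry : Int) : Int :=
  if m < 0 ∨ k < 0 ∨ m + (PySem.Int.bitCount carry : Int) < k then 0
  else if m = 0 then (if k = (PySem.Int.bitCount carry : Int) then 1 else 0)
  else
    match rest with
    | [] => 0
    | x :: r => magicalSumDpLoop m k x r carry (PySem.List.pyRange 0 (m + 1) 1) 0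
termination_by (rest.length, 0)

def magicalSumDpLoop (m k x : Int) (r : List Int) (carry : Int) (cs : List Int) (ans : Int) : Int :=
  match cs with
  | [] => ans
  | c :: cs' =>
    let delta := PySem.Int.mod (pyComb m c * PySem.Int.powMod x c.toNat 1000000007) 1000000007
    let nc := carry + c
    magicalSumDpLoop m k x r carry cs'
      (PySem.Int.mod
        (ans + magicalSumDp (m - c) (k - PySem.Int.mod nc 2) r (PySem.Int.floordiv nc 2) * delta)
        1000000007)
termination_by (r.length, cs.length + 1)
end

def magicalSum (m : Int) (k : Int) (nums : List Int) : Int :=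
  magicalSumDp m k nums 0

-- ===== PORT B =====
-- B's inner `for c in range(mm+1)` loop: spread cnt·delta over the successor states in the new dict
def altInner (x mm kk carry cnt : Int) (d : PySem.Dict (Int × Int × Int) Int) :
    PySem.Dict (Int × Int × Int) Int :=
  (PySem.List.pyRange 0 (mm + 1) 1).foldl (fun d c =>
    let delta := PySem.Int.mod (pyComb mm c * PySem.Int.powMod x c.toNat 1000000007) 1000000007
    let nc := carry + c
    let key : Int × Int × Int := (mm - c, kk - PySem.Int.mod nc 2, PySem.Int.floordiv nc 2)
    d.insert key (PySem.Int.mod (d.getD key 0 + cnt * delta) 1000000007)) d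

-- one entry `(mm, kk, carry) -> cnt` of the current state dict
def altEntry (x : Int) (acc : Int × PySem.Dict (Int × Int × Int) Int)
    (p : (Int × Int × Int) × Int) : Int × PySem.Dict (Int × Int × Int) Int :=
  let (mm, kk, carry) := p.1
  let cnt := p.2
  if mm < 0 ∨ kk < 0 ∨ mm + (PySem.Int.bitCount carry : Int) < kk then acc
  else if mm = 0 then
    (if kk = (PySem.Int.bitCount carry : Int) then (PySem.Int.mod (acc.1 + cnt) 1000000007, acc.2)
     else acc)
  else (acc.1, altInner x mm kk carry cnt acc.2)

-- one element x of nums: rebuild the state dict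
def altScan (st : Int × PySem.Dict (Int × Int × Int) Int) (x : Int) :
    Int × PySem.Dict (Int × Int × Int) Int :=
  st.2.items.foldl (altEntry x) (st.1, PySem.Dict.empty)

def magicalSum_alt (m : Int) (k : Int) (nums : List Int) : Int :=
  let st := nums.foldl altScan (0, PySem.Dict.empty.insert (m, k, 0) 1)
  st.2.items.foldl (fun a p =>
    if p.1.1 = 0 ∧ p.1.2.1 = (PySem.Int.bitCount p.1.2.2 : Int) then PySem.Int.mod (a + p.2) 1000000007
    else a) st.1

-- ===== PRECONDITION & SPEC =====
def Spec_magicalSum (m : Int) (k : Int) (nums : List Int) (out : Int) : Prop := out = magicalSum_alt m k nums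
instance (m : Int) (k : Int) (nums : List Int) (out : Int) : Decidable (Spec_magicalSum m k nums out) := by unfold Spec_magicalSum; infer_instance

-- ===== CLAIM (what is proved, stated in full; the proofs are below) =====
def Claim_equal_magicalSum : Prop := ∀ (m : Int) (k : Int) (nums : List Int), Dom_magicalSum m k nums → Spec_magicalSum m k nums (magicalSum m k nums)

-- ===== LEMMAS AND PROOFS =====

-- A's dp value of a state `(mm, kk, carry)`, in ZMod
def dpZ (s : Int × Int × Int) (rest : List Int) : ZMod 1000000007 :=
  ((magicalSumDp s.1 s.2.1 rest s.2.2 : Int) : ZMod 1000000007)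

-- Σ over dict entries of cnt · dp(state)
def entSum (l : List ((Int × Int × Int) × Int)) (rest : List Int) : ZMod 1000000007 :=
  (l.map (fun p => ((p.2 : Int) : ZMod 1000000007) * dpZ p.1 rest)).sum

lemma castMod (a : Int) :
    ((PySem.Int.mod a 1000000007 : Int) : ZMod 1000000007) = (a : ZMod 1000000007) := by
  rw [PySem.Int.mod_eq_emod_of_pos (by norm_num), Int.emod_def]
  push_cast
  rw [show (1000000007 : ZMod 1000000007) = 0 from by exact_mod_cast ZMod.natCast_self 1000000007]
  ring

lemma modBounds (a : Int) : 0 ≤ PySem.Int.mod a 1000000007 ∧ PySem.Int.mod a 1000000007 < 1000000007 :=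
  ⟨PySem.Int.mod_nonneg a (by norm_num), PySem.Int.mod_lt a (by norm_num)⟩

-- ----- A-side -----
lemma dpLoop_bounds (m k x : Int) (r : List Int) (carry : Int) :
    ∀ (cs : List Int) (ans : Int), 0 ≤ ans → ans < 1000000007 →
    0 ≤ magicalSumDpLoop m k x r carry cs ans ∧ magicalSumDpLoop m k x r carry cs ans < 1000000007 := by
  intro cs
  induction cs with
  | nil => intro ans h1 h2; rw [magicalSumDpLoop]; exact ⟨h1, h2⟩
  | cons c cs' ih =>
    intro ans h1 h2
    rw [magicalSumDpLoop]
    exact ih _ (modBounds _).1 (modBounds _).2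

lemma dp_bounds : ∀ (rest : List Int) (m k carry : Int),
    0 ≤ magicalSumDp m k rest carry ∧ magicalSumDp m k rest carry < 1000000007 := by
  intro rest
  induction rest with
  | nil =>
    intro m k carry
    rw [magicalSumDp]
    split_ifs <;> norm_num
  | cons x r ih =>
    intro m k carry
    rw [magicalSumDp]
    split_ifs with h1 h2 h3
    · norm_num
    · norm_num
    · norm_num
    · exact dpLoop_bounds m k x r carry _ 0 le_rfl (by norm_num)

lemma dpLoop_sum (x : Int) (r : List Int) : ∀ (cs : List Int) (m k carry ans : Int),
    ((magicalSumDpLoop m k x r carry cs ans : Int) : ZMod 1000000007) =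
      (ans : ZMod 1000000007) +
        (cs.map (fun c =>
          ((magicalSumDp (m - c) (k - PySem.Int.mod (carry + c) 2) r
              (PySem.Int.floordiv (carry + c) 2) : Int) : ZMod 1000000007) *
          ((PySem.Int.mod (pyComb m c * PySem.Int.powMod x c.toNat 1000000007) 1000000007 : Int) :
            ZMod 1000000007))).sum := by
  intro cs
  induction cs with
  | nil => intro m k carry ans; rw [magicalSumDpLoop]; simp
  | cons c cs' ih =>
    intro m k carry ans
    rw [magicalSumDpLoop]
    simp only [List.map_cons, List.sum_cons]
    rw [ih]
    rw [castMod]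
    push_cast
    ring

-- ----- B-side -----
lemma entSum_nil (rest : List Int) : entSum [] rest = 0 := rfl

lemma entSum_cons (p : (Int × Int × Int) × Int) (l : List ((Int × Int × Int) × Int)) (rest : List Int) :
    entSum (p :: l) rest = ((p.2 : Int) : ZMod 1000000007) * dpZ p.1 rest + entSum l rest := by
  simp [entSum]

lemma entSum_append (l1 l2 : List ((Int × Int × Int) × Int)) (rest : List Int) :
    entSum (l1 ++ l2) rest = entSum l1 rest + entSum l2 rest := by
  simp [entSum]

lemma entSum_update : ∀ (l : List ((Int × Int × Int) × Int)) (key : Int × Int × Int) (v w : Int)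
    (rest : List Int), (l.map (·.1)).Nodup → (key, v) ∈ l →
    entSum (l.map (fun p => if p.1 == key then (key, w) else p)) rest =
      entSum l rest - ((v : Int) : ZMod 1000000007) * dpZ key rest +
        ((w : Int) : ZMod 1000000007) * dpZ key rest := by
  intro l
  induction l with
  | nil => intro key v w rest _ hmem; simp at hmem
  | cons p t ih =>
    intro key v w rest hnd hmem
    by_cases hp : p.1 = key
    · have hkt : key ∉ t.map (·.1) := by
        simp only [List.map_cons, List.nodup_cons] at hnd
        rw [← hp]; exact hnd.1
      have hpv : p = (key, v) := by
        rcases List.mem_cons.mp hmem with h | h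
        · exact h.symm
        · exact absurd (List.mem_map.mpr ⟨(key, v), h, rfl⟩) hkt
      have htid : t.map (fun p => if p.1 == key then (key, w) else p) = t := by
        trans t.map id
        · apply List.map_congr_left
          intro q hq
          have : q.1 ≠ key := fun hqk => hkt (List.mem_map.mpr ⟨q, hq, hqk⟩)
          simp [this]
        · exact List.map_id t
      rw [List.map_cons, htid, if_pos (by simp [hp] : (p.1 == key) = true)]
      rw [entSum_cons, entSum_cons, hpv]
      ring
    · have hmem' : (key, v) ∈ t := by
        rcases List.mem_cons.mp hmem with h | h
        · exact absurd (congrArg Prod.fst h.symm) hp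
        · exact h
      have hnd' : (t.map (·.1)).Nodup := by
        simp only [List.map_cons, List.nodup_cons] at hnd; exact hnd.2
      rw [List.map_cons, if_neg (by simp [hp] : ¬ (p.1 == key) = true)]
      rw [entSum_cons, entSum_cons, ih key v w rest hnd' hmem']
      ring

lemma entSum_insertAdd (d : PySem.Dict (Int × Int × Int) Int) (hnd : d.keys.Nodup)
    (key : Int × Int × Int) (w : Int) (rest : List Int) :
    entSum ((d.insert key (PySem.Int.mod (d.getD key 0 + w) 1000000007)).items) rest =
      entSum d.items rest + ((w : Int) : ZMod 1000000007) * dpZ key rest := by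
  by_cases hc : d.contains key
  · obtain ⟨v, hv⟩ : ∃ v, (key, v) ∈ d.items := by
      have : key ∈ d.keys := (PySem.Dict.contains_iff_mem_keys d key).mp hc
      rcases List.mem_map.mp this with ⟨p, hp, hpk⟩
      exact ⟨p.2, by rwa [← hpk, Prod.mk.eta] ⟩
    have hgd : d.getD key 0 = v := PySem.Dict.getD_of_mem_items d hv hnd 0
    rw [PySem.Dict.items_insert_of_contains d _ hc]
    rw [entSum_update d.items key v _ rest hnd hv]
    rw [hgd, castMod]
    push_cast
    ring
  · rw [PySem.Dict.items_insert_of_not_contains d _ (by simpa using hc)]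
    rw [entSum_append]
    rw [PySem.Dict.getD_of_not_contains d 0 (by simpa using hc)]
    rw [entSum_cons, entSum_nil, castMod]
    push_cast
    ring

-- the body of B's inner loop, named for the proofs
def innerStep (x mm kk carry cnt : Int) (d : PySem.Dict (Int × Int × Int) Int) (c : Int) :
    PySem.Dict (Int × Int × Int) Int :=
  let delta := PySem.Int.mod (pyComb mm c * PySem.Int.powMod x c.toNat 1000000007) 1000000007
  let nc := carry + c
  let key : Int × Int × Int := (mm - c, kk - PySem.Int.mod nc 2, PySem.Int.floordiv nc 2)
  d.insert key (PySem.Int.mod (d.getD key 0 + cnt * delta) 1000000007)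

lemma altInner_eq (x mm kk carry cnt : Int) (d : PySem.Dict (Int × Int × Int) Int) :
    altInner x mm kk carry cnt d =
      (PySem.List.pyRange 0 (mm + 1) 1).foldl (innerStep x mm kk carry cnt) d := rfl

lemma innerFold_nodup (x mm kk carry cnt : Int) : ∀ (cs : List Int) (d : PySem.Dict (Int × Int × Int) Int),
    d.keys.Nodup → (cs.foldl (innerStep x mm kk carry cnt) d).keys.Nodup := by
  intro cs
  induction cs with
  | nil => intro d hnd; exact hnd
  | cons c cs' ih =>
    intro d hnd
    rw [List.foldl_cons]
    exact ih _ (PySem.Dict.nodup_keys_insert _ _ _ hnd)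

lemma innerFold_sum (x mm kk carry cnt : Int) (r : List Int) :
    ∀ (cs : List Int) (d : PySem.Dict (Int × Int × Int) Int), d.keys.Nodup →
    entSum ((cs.foldl (innerStep x mm kk carry cnt) d).items) r =
      entSum d.items r +
        (cs.map (fun c =>
          ((cnt : Int) : ZMod 1000000007) *
          (((magicalSumDp (mm - c) (kk - PySem.Int.mod (carry + c) 2) r
              (PySem.Int.floordiv (carry + c) 2) : Int) : ZMod 1000000007) *
          ((PySem.Int.mod (pyComb mm c * PySem.Int.powMod x c.toNat 1000000007) 1000000007 : Int) :
            ZMod 1000000007)))).sum := by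
  intro cs
  induction cs with
  | nil => intro d hnd; simp
  | cons c cs' ih =>
    intro d hnd
    rw [List.foldl_cons, List.map_cons, List.sum_cons]
    rw [show innerStep x mm kk carry cnt d c =
        d.insert (mm - c, kk - PySem.Int.mod (carry + c) 2, PySem.Int.floordiv (carry + c) 2)
          (PySem.Int.mod
            (d.getD (mm - c, kk - PySem.Int.mod (carry + c) 2, PySem.Int.floordiv (carry + c) 2) 0 +
              cnt * PySem.Int.mod (pyComb mm c * PySem.Int.powMod x c.toNat 1000000007) 1000000007)
            1000000007) from rfl]
    rw [ih _ (PySem.Dict.nodup_keys_insert _ _ _ hnd)]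
    rw [entSum_insertAdd d hnd]
    unfold dpZ
    push_cast
    ring

lemma altInner_nodup (x mm kk carry cnt : Int) (d : PySem.Dict (Int × Int × Int) Int)
    (hnd : d.keys.Nodup) : (altInner x mm kk carry cnt d).keys.Nodup := by
  rw [altInner_eq]
  exact innerFold_nodup x mm kk carry cnt _ d hnd

lemma altInner_sum (x mm kk carry cnt : Int) (d : PySem.Dict (Int × Int × Int) Int)
    (hnd : d.keys.Nodup) (r : List Int) :
    entSum (altInner x mm kk carry cnt d).items r =
      entSum d.items r +
        ((cnt : Int) : ZMod 1000000007) *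
          (((PySem.List.pyRange 0 (mm + 1) 1).map (fun c =>
            ((magicalSumDp (mm - c) (kk - PySem.Int.mod (carry + c) 2) r
                (PySem.Int.floordiv (carry + c) 2) : Int) : ZMod 1000000007) *
            ((PySem.Int.mod (pyComb mm c * PySem.Int.powMod x c.toNat 1000000007) 1000000007 : Int) :
              ZMod 1000000007))).sum) := by
  rw [altInner_eq, innerFold_sum x mm kk carry cnt r _ d hnd, ← List.sum_map_mul_left]

-- one entry preserves  ans + Σ_new-dict (over tail r) + Σ_remaining-entries (over x::r)
lemma altEntry_invariant (x : Int) (r : List Int) (p : (Int × Int × Int) × Int)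
    (a : Int) (d : PySem.Dict (Int × Int × Int) Int) (hnd : d.keys.Nodup) (ha : 0 ≤ a ∧ a < 1000000007) :
    (altEntry x (a, d) p).2.keys.Nodup ∧
    (0 ≤ (altEntry x (a, d) p).1 ∧ (altEntry x (a, d) p).1 < 1000000007) ∧
    (((altEntry x (a, d) p).1 : ZMod 1000000007) + entSum (altEntry x (a, d) p).2.items r =
      (a : ZMod 1000000007) + entSum d.items r +
        ((p.2 : Int) : ZMod 1000000007) * dpZ p.1 (x :: r)) := by
  obtain ⟨⟨mm, kk, carry⟩, cnt⟩ := p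
  simp only [altEntry]
  by_cases h1 : mm < 0 ∨ kk < 0 ∨ mm + (PySem.Int.bitCount carry : Int) < kk
  · have hdp : magicalSumDp mm kk (x :: r) carry = 0 := by
      rw [magicalSumDp, if_pos h1]
    rw [if_pos h1]
    refine ⟨hnd, ha, ?_⟩
    simp [dpZ, hdp]
  · rw [if_neg h1]
    by_cases h2 : mm = 0
    · rw [if_pos h2]
      by_cases h3 : kk = (PySem.Int.bitCount carry : Int)
      · have hdp : magicalSumDp mm kk (x :: r) carry = 1 := by
          rw [magicalSumDp, if_neg h1, if_pos h2, if_pos h3]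
        rw [if_pos h3]
        refine ⟨hnd, ⟨(modBounds _).1, (modBounds _).2⟩, ?_⟩
        simp only [dpZ, hdp]
        rw [castMod]
        push_cast
        ring
      · have hdp : magicalSumDp mm kk (x :: r) carry = 0 := by
          rw [magicalSumDp, if_neg h1, if_pos h2, if_neg h3]
        rw [if_neg h3]
        refine ⟨hnd, ha, ?_⟩
        simp [dpZ, hdp]
    · rw [if_neg h2]
      have hdp : magicalSumDp mm kk (x :: r) carry =
          magicalSumDpLoop mm kk x r carry (PySem.List.pyRange 0 (mm + 1) 1) 0 := by
        rw [magicalSumDp, if_neg h1, if_neg h2]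
      refine ⟨altInner_nodup x mm kk carry cnt d hnd, ha, ?_⟩
      rw [altInner_sum x mm kk carry cnt d hnd r]
      simp only [dpZ, hdp]
      rw [dpLoop_sum x r (PySem.List.pyRange 0 (mm + 1) 1) mm kk carry 0]
      push_cast
      ring

lemma altScan_invariant (x : Int) (r : List Int) :
    ∀ (its : List ((Int × Int × Int) × Int)) (a : Int) (d : PySem.Dict (Int × Int × Int) Int),
    d.keys.Nodup → 0 ≤ a → a < 1000000007 →
    (its.foldl (altEntry x) (a, d)).2.keys.Nodup ∧
    (0 ≤ (its.foldl (altEntry x) (a, d)).1 ∧ (its.foldl (altEntry x) (a, d)).1 < 1000000007) ∧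
    (((its.foldl (altEntry x) (a, d)).1 : ZMod 1000000007) +
        entSum (its.foldl (altEntry x) (a, d)).2.items r =
      (a : ZMod 1000000007) + entSum d.items r + entSum its (x :: r)) := by
  intro its
  induction its with
  | nil =>
    intro a d hnd h0 h1
    refine ⟨hnd, ⟨h0, h1⟩, ?_⟩
    simp only [List.foldl_nil, entSum_nil]
    ring
  | cons p its' ih =>
    intro a d hnd h0 h1
    rw [List.foldl_cons]
    obtain ⟨hn1, hb1, he1⟩ := altEntry_invariant x r p a d hnd ⟨h0, h1⟩
    have H := ih (altEntry x (a, d) p).1 (altEntry x (a, d) p).2 hn1 hb1.1 hb1.2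
    rw [Prod.mk.eta] at H
    refine ⟨H.1, H.2.1, ?_⟩
    rw [H.2.2, he1, entSum_cons]
    ring

lemma outer_invariant : ∀ (rest : List Int) (a : Int) (d : PySem.Dict (Int × Int × Int) Int),
    d.keys.Nodup → 0 ≤ a → a < 1000000007 →
    (rest.foldl altScan (a, d)).2.keys.Nodup ∧
    (0 ≤ (rest.foldl altScan (a, d)).1 ∧ (rest.foldl altScan (a, d)).1 < 1000000007) ∧
    (((rest.foldl altScan (a, d)).1 : ZMod 1000000007) +
        entSum (rest.foldl altScan (a, d)).2.items [] =
      (a : ZMod 1000000007) + entSum d.items rest) := by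
  intro rest
  induction rest with
  | nil =>
    intro a d hnd h0 h1
    exact ⟨hnd, ⟨h0, h1⟩, rfl⟩
  | cons x r' ih =>
    intro a d hnd h0 h1
    rw [List.foldl_cons]
    have hscan := altScan_invariant x r' d.items a PySem.Dict.empty PySem.Dict.nodup_keys_empty h0 h1
    have hempty : entSum (PySem.Dict.empty : PySem.Dict (Int × Int × Int) Int).items r' = 0 := rfl
    rw [hempty] at hscan
    obtain ⟨hn1, hb1, he1⟩ := hscan
    have hout : altScan (a, d) x = d.items.foldl (altEntry x) (a, PySem.Dict.empty) := rfl
    rw [hout]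
    have H := ih (d.items.foldl (altEntry x) (a, PySem.Dict.empty)).1
      (d.items.foldl (altEntry x) (a, PySem.Dict.empty)).2 hn1 hb1.1 hb1.2
    rw [Prod.mk.eta] at H
    refine ⟨H.1, H.2.1, ?_⟩
    rw [H.2.2, he1]
    ring

lemma final_invariant : ∀ (its : List ((Int × Int × Int) × Int)) (a : Int),
    0 ≤ a → a < 1000000007 →
    (0 ≤ its.foldl (fun a p =>
        if p.1.1 = 0 ∧ p.1.2.1 = (PySem.Int.bitCount p.1.2.2 : Int) then PySem.Int.mod (a + p.2) 1000000007
        else a) a ∧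
      its.foldl (fun a p =>
        if p.1.1 = 0 ∧ p.1.2.1 = (PySem.Int.bitCount p.1.2.2 : Int) then PySem.Int.mod (a + p.2) 1000000007
        else a) a < 1000000007) ∧
    ((its.foldl (fun a p =>
        if p.1.1 = 0 ∧ p.1.2.1 = (PySem.Int.bitCount p.1.2.2 : Int) then PySem.Int.mod (a + p.2) 1000000007
        else a) a : Int) : ZMod 1000000007) =
      (a : ZMod 1000000007) + entSum its [] := by
  intro its
  induction its with
  | nil => intro a h0 h1; exact ⟨⟨h0, h1⟩, by simp [entSum_nil]⟩
  | cons p t ih =>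
    intro a h0 h1
    rw [List.foldl_cons]
    by_cases hc : p.1.1 = 0 ∧ p.1.2.1 = (PySem.Int.bitCount p.1.2.2 : Int)
    · have hdp : magicalSumDp p.1.1 p.1.2.1 [] p.1.2.2 = 1 := by
        rw [magicalSumDp, if_neg (by rw [hc.1, hc.2]; rintro (h | h | h) <;> omega),
          if_pos hc.1, if_pos hc.2]
      rw [if_pos hc]
      have H := ih (PySem.Int.mod (a + p.2) 1000000007) (modBounds _).1 (modBounds _).2
      refine ⟨H.1, ?_⟩
      rw [H.2, castMod, entSum_cons]
      simp only [dpZ, hdp]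
      push_cast
      ring
    · have hdp : magicalSumDp p.1.1 p.1.2.1 [] p.1.2.2 = 0 := by
        rw [magicalSumDp]
        split_ifs with g1 g2 g3
        · rfl
        · exact absurd ⟨g2, g3⟩ hc
        · rfl
        · rfl
      rw [if_neg hc]
      have H := ih a h0 h1
      refine ⟨H.1, ?_⟩
      rw [H.2, entSum_cons]
      simp only [dpZ, hdp]
      push_cast
      ring

-- ===== VERDICT (by name: the statement is the Claim_ definition above) =====
theorem magicalSum_spec : Claim_equal_magicalSum := by
  unfold Claim_equal_magicalSum
  intro m k nums _
  unfold Spec_magicalSum magicalSum magicalSum_alt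
  dsimp only
  have hd0 : (PySem.Dict.empty.insert ((m, k, 0) : Int × Int × Int) (1 : Int)).keys.Nodup :=
    PySem.Dict.nodup_keys_insert _ _ _ PySem.Dict.nodup_keys_empty
  obtain ⟨hn, ⟨hb0, hb1⟩, he⟩ :=
    outer_invariant nums 0 (PySem.Dict.empty.insert (m, k, 0) 1) hd0 le_rfl (by norm_num)
  have hd0items : (PySem.Dict.empty.insert ((m, k, 0) : Int × Int × Int) (1 : Int)).items =
      [((m, k, 0), 1)] := by
    rw [PySem.Dict.items_insert_of_not_contains _ _ (by rfl)]
    rfl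
  rw [hd0items] at he
  have hinit : entSum [((m, k, 0), 1)] nums = dpZ (m, k, 0) nums := by
    rw [entSum_cons, entSum_nil]
    push_cast
    ring
  rw [hinit] at he
  set st := nums.foldl altScan (0, PySem.Dict.empty.insert (m, k, 0) 1) with hst
  obtain ⟨⟨hf0, hf1⟩, hfe⟩ := final_invariant st.2.items st.1 hb0 hb1
  rw [he] at hfe
  have hdb := dp_bounds nums m k 0
  have : ((st.2.items.foldl (fun a p =>
      if p.1.1 = 0 ∧ p.1.2.1 = (PySem.Int.bitCount p.1.2.2 : Int) then PySem.Int.mod (a + p.2) 1000000007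
      else a) st.1 : Int) : ZMod 1000000007) = ((magicalSumDp m k nums 0 : Int) : ZMod 1000000007) := by
    rw [hfe]
    simp [dpZ]
  rw [ZMod.intCast_eq_intCast_iff'] at this
  omega
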